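-- pv_equiv track=rewrite | github.com/ShoY634/training | python/2023_03_07-2.py | make_num_list_imp
-- ===== SOURCE A (Python) =====
-- def make_num_list_imp(start, end):
--     num_list2 = []
--
--     while start <= end:
--         tuple2 = (start, start+1)
--
--         if start % 3 == 0 or (start + 1) % 3 == 0:
--             start += 1
--             continue
--
--         num_list2.append(tuple2)
--         start += 1
--
--
--     return num_list2
-- ===== SOURCE B (Python) =====
-- def make_num_list_imp(start, end):
--     first = start + (1 - start) % 3
--     return [(s, s + 1) for s in range(first, end + 1, 3)]
-- ===== Notes on version B (the rewrite author's own statement) =====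
-- stated objective: faster
-- what changed: A scans every integer in [start,end] testing divisibility and skipping two of three; B computes the first value with start ≡ 1 (mod 3) in closed form and steps directly through the arithmetic progression with range(first, end+1, 3), visiting only kept elements.
import Mathlib
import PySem

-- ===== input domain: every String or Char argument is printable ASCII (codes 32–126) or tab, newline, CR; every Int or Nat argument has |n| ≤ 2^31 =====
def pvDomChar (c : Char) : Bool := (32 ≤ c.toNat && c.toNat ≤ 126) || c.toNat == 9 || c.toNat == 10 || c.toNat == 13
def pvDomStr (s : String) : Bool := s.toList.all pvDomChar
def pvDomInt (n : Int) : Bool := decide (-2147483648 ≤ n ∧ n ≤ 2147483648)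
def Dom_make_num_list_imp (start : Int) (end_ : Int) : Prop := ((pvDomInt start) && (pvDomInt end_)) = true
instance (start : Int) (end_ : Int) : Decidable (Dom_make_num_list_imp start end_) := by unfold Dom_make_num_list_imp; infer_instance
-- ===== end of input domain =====

-- B replaces A's scan-every-integer-and-skip loop by direct stepping through the
-- arithmetic progression start ≡ 1 (mod 3) via range(first, end+1, 3).

-- ===== PORT A =====
-- the while loop of A: accumulator = num_list2, counter = start
def mkLoopA (start : Int) (end_ : Int) (acc : List (Int × Int)) : List (Int × Int) :=
  if _h : start ≤ end_ then
    if PySem.Int.mod start 3 = 0 ∨ PySem.Int.mod (start + 1) 3 = 0 then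
      mkLoopA (start + 1) end_ acc
    else
      mkLoopA (start + 1) end_ (acc ++ [(start, start + 1)])
  else acc
termination_by (end_ + 1 - start).toNat
decreasing_by all_goals omega

def make_num_list_imp (start : Int) (end_ : Int) : List (Int × Int) :=
  mkLoopA start end_ []

-- ===== PORT B =====
def make_num_list_imp_alt (start : Int) (end_ : Int) : List (Int × Int) :=
  (PySem.List.pyRange (start + PySem.Int.mod (1 - start) 3) (end_ + 1) 3).map (fun s => (s, s + 1))

-- ===== PRECONDITION & SPEC =====
def Spec_make_num_list_imp (start : Int) (end_ : Int) (out : List (Int × Int)) : Prop := out = make_num_list_imp_alt start end_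
instance (start : Int) (end_ : Int) (out : List (Int × Int)) : Decidable (Spec_make_num_list_imp start end_ out) := by unfold Spec_make_num_list_imp; infer_instance

-- ===== CLAIM (what is proved, stated in full; the proofs are below) =====
def Claim_equal_make_num_list_imp : Prop := ∀ (start : Int) (end_ : Int), Dom_make_num_list_imp start end_ → Spec_make_num_list_imp start end_ (make_num_list_imp start end_)

-- ===== LEMMAS AND PROOFS =====

-- Python's floored mod with a positive literal divisor is Lean's emod.
theorem pymod_three (x : Int) : PySem.Int.mod x 3 = x % 3 := by
  simp [PySem.Int.mod, Int.fmod_eq_emod_of_nonneg]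

-- cons form of pyRange for step 3
theorem pyRange_three_cons (a b : Int) (h : a < b) :
    PySem.List.pyRange a b 3 = a :: PySem.List.pyRange (a + 3) b 3 := by
  rw [PySem.List.pyRange_of_pos a b (by norm_num), PySem.List.pyRange_of_pos (a + 3) b (by norm_num)]
  have hn : (if a < b then ((b - a + 3 - 1) / 3).toNat else 0)
      = (if a + 3 < b then ((b - (a + 3) + 3 - 1) / 3).toNat else 0) + 1 := by
    split_ifs <;> omega
  rw [hn, List.range_succ_eq_map, List.map_cons, List.map_map]
  simp only [List.cons.injEq]
  refine ⟨by push_cast; ring, ?_⟩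
  apply List.map_congr_left
  intro k _
  simp [Function.comp]
  push_cast
  ring

-- empty form of pyRange for step 3
theorem pyRange_three_nil (a b : Int) (h : b ≤ a) :
    PySem.List.pyRange a b 3 = [] := by
  rw [PySem.List.pyRange_of_pos a b (by norm_num)]
  have : (if a < b then ((b - a + 3 - 1) / 3).toNat else 0) = 0 := by
    split_ifs <;> omega
  simp [this]

-- B skips non-qualifying starts: if start % 3 ≠ 1 the first kept value is unchanged.
theorem alt_skip (start end_ : Int) (h : ¬ start % 3 = 1) :
    make_num_list_imp_alt start end_ = make_num_list_imp_alt (start + 1) end_ := by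
  unfold make_num_list_imp_alt
  have : start + PySem.Int.mod (1 - start) 3 = (start + 1) + PySem.Int.mod (1 - (start + 1)) 3 := by
    rw [pymod_three, pymod_three]; omega
  rw [this]

-- B keeps a qualifying start in range as the head of its progression.
theorem alt_keep (start end_ : Int) (h : start % 3 = 1) (hle : start ≤ end_) :
    make_num_list_imp_alt start end_ = (start, start + 1) :: make_num_list_imp_alt (start + 1) end_ := by
  unfold make_num_list_imp_alt
  have h1 : start + PySem.Int.mod (1 - start) 3 = start := by rw [pymod_three]; omega
  have h2 : (start + 1) + PySem.Int.mod (1 - (start + 1)) 3 = start + 3 := by rw [pymod_three]; omega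
  rw [h1, h2, pyRange_three_cons start (end_ + 1) (by omega), List.map_cons]

-- B's list is empty once start is past the end.
theorem alt_nil (start end_ : Int) (h : ¬ start ≤ end_) :
    make_num_list_imp_alt start end_ = [] := by
  unfold make_num_list_imp_alt
  have hm : 0 ≤ PySem.Int.mod (1 - start) 3 := by rw [pymod_three]; omega
  rw [pyRange_three_nil _ _ (by omega)]
  simp

-- loop invariant: A's accumulator loop produces acc ++ (B's value)
theorem mkLoopA_eq (n : Nat) : ∀ (start end_ : Int) (acc : List (Int × Int)),
    (end_ + 1 - start).toNat = n →
    mkLoopA start end_ acc = acc ++ make_num_list_imp_alt start end_ := by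
  induction n with
  | zero =>
    intro start end_ acc hn
    have h : ¬ start ≤ end_ := by omega
    rw [mkLoopA, dif_neg h, alt_nil start end_ h, List.append_nil]
  | succ m ih =>
    intro start end_ acc hn
    have h : start ≤ end_ := by omega
    rw [mkLoopA, dif_pos h]
    have hrec : (end_ + 1 - (start + 1)).toNat = m := by omega
    by_cases hc : PySem.Int.mod start 3 = 0 ∨ PySem.Int.mod (start + 1) 3 = 0
    · rw [if_pos hc, ih (start + 1) end_ acc hrec]
      have hne : ¬ start % 3 = 1 := by
        rw [pymod_three, pymod_three] at hc; omega
      rw [alt_skip start end_ hne]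
    · rw [if_neg hc, ih (start + 1) end_ (acc ++ [(start, start + 1)]) hrec]
      have heq : start % 3 = 1 := by
        rw [pymod_three, pymod_three] at hc; omega
      rw [alt_keep start end_ heq h]
      simp

-- ===== VERDICT (by name: the statement is the Claim_ definition above) =====
theorem make_num_list_imp_spec : Claim_equal_make_num_list_imp := by
  intro start end_ _
  unfold Spec_make_num_list_imp make_num_list_imp
  rw [mkLoopA_eq (end_ + 1 - start).toNat start end_ [] rfl]
  simp
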